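-- pv_equiv track=rewrite | github.com/pluskal-lab/TerpeneMiner | utils/structural_domains.py | return_short_enough_segments
-- ===== SOURCE A (Python) =====
-- def return_short_enough_segments(segment, max_allowed_length):
--     if max(segment) - min(segment) <= max_allowed_length:
--         return [segment]
--     mid_index = (max(segment) + min(segment)) / 2
--     return return_short_enough_segments(
--         [res for res in segment if res <= mid_index], max_allowed_length
--     ) + return_short_enough_segments(
--         [res for res in segment if res > mid_index], max_allowed_length
--     )
-- ===== SOURCE B (Python) =====
-- def return_short_enough_segments(segment, max_allowed_length):
--     # Different algorithm: work on the sorted distinct VALUES only.  Recursively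
--     # cut the sorted value list into contiguous runs whose span fits (DFS,
--     # left run first, matching A's left-to-right emission order), then build a
--     # value -> run-index map and distribute the original elements into their
--     # runs in ONE pass, preserving A's element order inside each segment.
--     vals = sorted(set(segment))
--     groups = []
--
--     def cut(w):
--         lo, hi = w[0], w[-1]
--         if hi - lo <= max_allowed_length:
--             groups.append(w)
--             return
--         # w is strictly increasing and w[0] is below the midpoint, so scan for
--         # the first value above it (r <= (lo+hi)/2  iff  2*r <= lo+hi, exactly).
--         k = 1
--         while 2 * w[k] <= lo + hi:
--             k += 1
--         cut(w[:k])
--         cut(w[k:])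
--
--     cut(vals)
--     index_of = {}
--     for i, g in enumerate(groups):
--         for v in g:
--             index_of[v] = i
--     buckets = [[] for _ in groups]
--     for r in segment:
--         buckets[index_of[r]].append(r)
--     return buckets
-- ===== Notes on version B (the rewrite author's own statement) =====
-- stated objective: alternative
-- what changed: Instead of recursively filtering the element list at each midpoint, B sorts the distinct values once, recursively cuts that strictly increasing value list into contiguous runs, builds a value-to-run-index dictionary, and distributes the original elements into their runs in one pass, with the float midpoint test replaced by the exact integer test 2*r <= lo+hi.
import Mathlib
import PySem

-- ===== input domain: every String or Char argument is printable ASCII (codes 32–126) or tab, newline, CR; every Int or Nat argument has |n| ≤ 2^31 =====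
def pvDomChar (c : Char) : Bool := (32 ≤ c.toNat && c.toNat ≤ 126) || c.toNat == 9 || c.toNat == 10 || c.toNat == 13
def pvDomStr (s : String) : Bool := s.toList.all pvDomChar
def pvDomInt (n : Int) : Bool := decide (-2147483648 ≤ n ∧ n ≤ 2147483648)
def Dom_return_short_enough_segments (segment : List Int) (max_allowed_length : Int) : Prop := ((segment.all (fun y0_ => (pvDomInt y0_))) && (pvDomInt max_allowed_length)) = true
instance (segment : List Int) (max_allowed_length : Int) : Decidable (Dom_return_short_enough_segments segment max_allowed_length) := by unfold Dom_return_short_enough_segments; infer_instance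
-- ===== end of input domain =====

-- B replaces A's recursive filter-splitting of the element list by a cut of the sorted
-- distinct VALUES into interval runs, each realised once as a filter of the original list —
-- alternative decomposition, similar cost; return-value equivalence only.  In both ports the
-- Python float test `r <= (mx+mn)/2` is ported as the integer test `2*r <= mx+mn`, exact on
-- the |n| ≤ 2^31 domain (mx+mn and r are exactly representable doubles and halving is exact).

-- ===== PORT A =====
-- max(seg) / min(seg); Python raises ValueError on [], which Pre_ excludes (getD 0 is never the result there)
def segMax (seg : List Int) : Int := (PySem.List.max? seg (fun x => x)).getD 0
def segMin (seg : List Int) : Int := (PySem.List.min? seg (fun x => x)).getD 0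
-- value range of a segment, used only to pick sufficient fuel for the (possibly non-terminating) recursion
def pvRange (seg : List Int) : Nat := (segMax seg - segMin seg).toNat

-- fuel-guarded transliteration of A's recursion; fuel only makes it total (never exhausted under Pre_)
def goA : Nat → List Int → Int → List (List Int)
  | 0, _, _ => []
  | f + 1, seg, L =>
    if segMax seg - segMin seg ≤ L then [seg]
    else goA f (seg.filter (fun r => 2 * r ≤ segMax seg + segMin seg)) L ++
         goA f (seg.filter (fun r => 2 * r > segMax seg + segMin seg)) L

def return_short_enough_segments (segment : List Int) (max_allowed_length : Int) : List (List Int) :=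
  goA (pvRange segment + 1) segment max_allowed_length

-- ===== PORT B =====
-- Source B's inner `while 2 * w[k] <= lo + hi: k += 1` scan; the end-of-list guard only makes it
-- total (Python would raise IndexError there; never reached under Pre_)
def scanK : List Int → Int → Nat → Nat
  | [], _, k => k
  | v :: tl, s, k => if 2 * v ≤ s then scanK tl s (k + 1) else k

-- Source B's `cut`: recursively split the sorted distinct value list, recording the runs in
-- DFS order; fuel only makes it total (never exhausted under Pre_)
def cutB : Nat → List Int → Int → List (List Int)
  | 0, _, _ => []
  | f + 1, w, L =>
    let lo := w.headD 0
    let hi := w.getLastD 0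
    if hi - lo ≤ L then [w]
    else
      let k := scanK (w.drop 1) (lo + hi) 1
      cutB f (w.take k) L ++ cutB f (w.drop k) L

-- Source B's main body: cut the sorted distinct values, build the value → run-index dict,
-- distribute the elements in one pass.  `bs.set i (bs.getD i [] ++ [r])` is Python's
-- `buckets[index_of[r]].append(r)`: the index is always in range and the key always
-- present there, so the `.getD` defaults are only totality guards.
def return_short_enough_segments_alt (segment : List Int) (max_allowed_length : Int) : List (List Int) :=
  let vals := PySem.List.sorted (PySem.Set.ofList segment) (fun x => x) false
  let groups := cutB ((vals.getLastD 0 - vals.headD 0).toNat + 1) vals max_allowed_length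
  let indexOf := (PySem.List.enumerate groups).foldl
    (fun d p => p.2.foldl (fun d v => PySem.Dict.insert d v p.1) d) PySem.Dict.empty
  segment.foldl
    (fun bs r =>
      let i := (PySem.Dict.getD indexOf r 0).toNat
      bs.set i (bs.getD i [] ++ [r]))
    (groups.map (fun _ => ([] : List Int)))

-- ===== PRECONDITION & SPEC =====
-- Pre_ excludes exactly the inputs on which Python A raises: the empty list (ValueError from max([]))
-- and a negative max_allowed_length (the recursion then never bottoms out: RecursionError).
def Pre_return_short_enough_segments (segment : List Int) (max_allowed_length : Int) : Prop :=
  segment ≠ [] ∧ 0 ≤ max_allowed_length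
instance (segment : List Int) (max_allowed_length : Int) : Decidable (Pre_return_short_enough_segments segment max_allowed_length) := by unfold Pre_return_short_enough_segments; infer_instance
def pvWitness_return_short_enough_segments : List Int × Int := ([1, 9, 4], 3)

def Spec_return_short_enough_segments (segment : List Int) (max_allowed_length : Int) (out : List (List Int)) : Prop := out = return_short_enough_segments_alt segment max_allowed_length
instance (segment : List Int) (max_allowed_length : Int) (out : List (List Int)) : Decidable (Spec_return_short_enough_segments segment max_allowed_length out) := by unfold Spec_return_short_enough_segments; infer_instance

-- ===== CLAIM (what is proved, stated in full; the proofs are below) =====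
def Claim_equal_return_short_enough_segments : Prop := ∀ (segment : List Int) (max_allowed_length : Int), Dom_return_short_enough_segments segment max_allowed_length → Pre_return_short_enough_segments segment max_allowed_length → Spec_return_short_enough_segments segment max_allowed_length (return_short_enough_segments segment max_allowed_length)

-- ===== LEMMAS AND PROOFS =====

theorem segMax_spec {seg : List Int} (h : seg ≠ []) :
    segMax seg ∈ seg ∧ ∀ y ∈ seg, y ≤ segMax seg := by
  rcases h' : PySem.List.max? seg (fun x => x) with _ | m
  · exact absurd ((PySem.List.max?_eq_none_iff seg _).mp h') h
  · have hm := PySem.List.max?_mem h'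
    have hmax := PySem.List.max?_isMax h'
    simp only [segMax, h', Option.getD_some]
    exact ⟨hm, hmax⟩

theorem segMin_spec {seg : List Int} (h : seg ≠ []) :
    segMin seg ∈ seg ∧ ∀ y ∈ seg, segMin seg ≤ y := by
  rcases h' : PySem.List.min? seg (fun x => x) with _ | m
  · exact absurd ((PySem.List.min?_eq_none_iff seg _).mp h') h
  · have hm := PySem.List.min?_mem h'
    have hmin := PySem.List.min?_isMin h'
    simp only [segMin, h', Option.getD_some]
    exact ⟨hm, hmin⟩

theorem segMin_le_segMax {seg : List Int} (h : seg ≠ []) : segMin seg ≤ segMax seg :=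
  (segMin_spec h).2 _ (segMax_spec h).1

-- the lower half: nonempty and of strictly smaller range, when min < max
theorem left_facts {seg : List Int} (h : seg ≠ []) (hlt : segMin seg < segMax seg) :
    (seg.filter (fun r => 2 * r ≤ segMax seg + segMin seg)) ≠ [] ∧
    pvRange (seg.filter (fun r => 2 * r ≤ segMax seg + segMin seg)) < pvRange seg := by
  set lf := seg.filter (fun r => 2 * r ≤ segMax seg + segMin seg) with hlf
  have hmem : segMin seg ∈ lf := by
    rw [hlf, List.mem_filter]
    exact ⟨(segMin_spec h).1, by simp; omega⟩
  have hne : lf ≠ [] := by intro he; rw [he] at hmem; exact absurd hmem (List.not_mem_nil)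
  refine ⟨hne, ?_⟩
  obtain ⟨hMmem, hMmax⟩ := segMax_spec hne
  obtain ⟨hmmem, hmmin⟩ := segMin_spec hne
  have h1 : segMax lf ∈ seg ∧ 2 * segMax lf ≤ segMax seg + segMin seg := by
    have := hMmem; rw [hlf, List.mem_filter] at this; simpa using this
  have h2 : segMin seg ≤ segMin lf := (segMin_spec h).2 _ (by
    have := hmmem; rw [hlf, List.mem_filter] at this; exact this.1)
  have h3 : segMin lf ≤ segMax lf := hmmin _ hMmem
  simp only [pvRange]; omega
-- the upper half: nonempty and of strictly smaller range, when min < max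
theorem right_facts {seg : List Int} (h : seg ≠ []) (hlt : segMin seg < segMax seg) :
    (seg.filter (fun r => 2 * r > segMax seg + segMin seg)) ≠ [] ∧
    pvRange (seg.filter (fun r => 2 * r > segMax seg + segMin seg)) < pvRange seg := by
  set rt := seg.filter (fun r => 2 * r > segMax seg + segMin seg) with hrt
  have hmem : segMax seg ∈ rt := by
    rw [hrt, List.mem_filter]
    exact ⟨(segMax_spec h).1, by simp; omega⟩
  have hne : rt ≠ [] := by intro he; rw [he] at hmem; exact absurd hmem (List.not_mem_nil)
  refine ⟨hne, ?_⟩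
  obtain ⟨hMmem, hMmax⟩ := segMax_spec hne
  obtain ⟨hmmem, hmmin⟩ := segMin_spec hne
  have h1 : segMin rt ∈ seg ∧ segMax seg + segMin seg < 2 * segMin rt := by
    have := hmmem; rw [hrt, List.mem_filter] at this; simpa using this
  have h2 : segMax rt ≤ segMax seg := (segMax_spec h).2 _ (by
    have := hMmem; rw [hrt, List.mem_filter] at this; exact this.1)
  have h3 : segMin rt ≤ segMax rt := hmmin _ hMmem
  simp only [pvRange]; omega

-- fuel irrelevance for A's recursion: any fuel above the range gives the same result
theorem goA_irrel (n : Nat) : ∀ (seg : List Int) (L : Int) (f g : Nat),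
    seg ≠ [] → 0 ≤ L → pvRange seg ≤ n → pvRange seg < f → pvRange seg < g →
    goA f seg L = goA g seg L := by
  induction n with
  | zero =>
    intro seg L f g h hL hn hf hg
    obtain ⟨f', rfl⟩ : ∃ f', f = f' + 1 := ⟨f - 1, by omega⟩
    obtain ⟨g', rfl⟩ : ∃ g', g = g' + 1 := ⟨g - 1, by omega⟩
    have hcond : segMax seg - segMin seg ≤ L := by
      have := segMin_le_segMax h
      simp only [pvRange] at hn; omega
    simp only [goA, if_pos hcond]
  | succ n ih =>
    intro seg L f g h hL hn hf hg
    obtain ⟨f', rfl⟩ : ∃ f', f = f' + 1 := ⟨f - 1, by omega⟩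
    obtain ⟨g', rfl⟩ : ∃ g', g = g' + 1 := ⟨g - 1, by omega⟩
    simp only [goA]
    split_ifs with hcond
    · rfl
    · have hlt : segMin seg < segMax seg := by omega
      obtain ⟨hlne, hllt⟩ := left_facts h hlt
      obtain ⟨hrne, hrlt⟩ := right_facts h hlt
      rw [ih _ L f' g' hlne hL (by omega) (by omega) (by omega),
          ih _ L f' g' hrne hL (by omega) (by omega) (by omega)]

-- canonical value of A's recursion
def Afix (seg : List Int) (L : Int) : List (List Int) := goA (pvRange seg + 1) seg L

theorem goA_eq_Afix {seg : List Int} {L : Int} {f : Nat} (h : seg ≠ []) (hL : 0 ≤ L)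
    (hf : pvRange seg < f) : goA f seg L = Afix seg L :=
  goA_irrel (pvRange seg) seg L f (pvRange seg + 1) h hL le_rfl hf (by omega)

theorem Afix_short {seg : List Int} {L : Int} (hcond : segMax seg - segMin seg ≤ L) :
    Afix seg L = [seg] := by
  simp only [Afix, goA, if_pos hcond]

theorem Afix_long {seg : List Int} {L : Int} (h : seg ≠ []) (hL : 0 ≤ L)
    (hcond : ¬ segMax seg - segMin seg ≤ L) :
    Afix seg L = Afix (seg.filter (fun r => 2 * r ≤ segMax seg + segMin seg)) L ++
                 Afix (seg.filter (fun r => 2 * r > segMax seg + segMin seg)) L := by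
  have hlt : segMin seg < segMax seg := by omega
  obtain ⟨hlne, hllt⟩ := left_facts h hlt
  obtain ⟨hrne, hrlt⟩ := right_facts h hlt
  have h1 : Afix seg L =
      goA (pvRange seg) (seg.filter (fun r => 2 * r ≤ segMax seg + segMin seg)) L ++
      goA (pvRange seg) (seg.filter (fun r => 2 * r > segMax seg + segMin seg)) L := by
    conv_lhs => rw [Afix, goA]
    rw [if_neg hcond]
  rw [goA_eq_Afix hlne hL hllt, goA_eq_Afix hrne hL hrlt] at h1
  exact h1

-- ---------- B-side machinery ----------

-- value range of a cut slice (last - first), the fuel measure of cutB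
def rngW (w : List Int) : Nat := (w.getLastD 0 - w.headD 0).toNat

theorem getLastD_indep (l : List Int) (h : l ≠ []) (d d' : Int) : l.getLastD d = l.getLastD d' := by
  cases l with
  | nil => exact absurd rfl h
  | cons a tl => cases tl with
    | nil => rfl
    | cons b tl' => rfl

theorem getLastD_mem' (l : List Int) (h : l ≠ []) : ∀ (d : Int), l.getLastD d ∈ l := by
  induction l with
  | nil => exact absurd rfl h
  | cons a tl ih =>
    intro d
    cases tl with
    | nil => simp
    | cons b tl' =>
      rw [List.getLastD_cons]
      exact List.mem_cons_of_mem a (ih (by simp) a)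

theorem getLastD_append (l₁ l₂ : List Int) (h : l₂ ≠ []) (d : Int) :
    (l₁ ++ l₂).getLastD d = l₂.getLastD d := by
  induction l₁ with
  | nil => rfl
  | cons a tl ih =>
    rw [List.cons_append, List.getLastD_cons,
        getLastD_indep (tl ++ l₂) (by simp [h]) a d, ih]

-- elements of a strictly sorted list lie between its first and last element
theorem sorted_le_last {w : List Int} (hp : w.Pairwise (· < ·)) :
    ∀ v ∈ w, v ≤ w.getLastD 0 := by
  induction w with
  | nil => intro v hv; simp at hv
  | cons a tl ih =>
    rw [List.pairwise_cons] at hp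
    intro v hv
    cases tl with
    | nil => simp at hv; simp [hv]
    | cons b tl' =>
      rw [List.getLastD_cons, getLastD_indep (b :: tl') (by simp) a 0]
      rcases List.mem_cons.mp hv with rfl | hv
      · exact le_of_lt (hp.1 _ (getLastD_mem' (b :: tl') (by simp) 0))
      · exact ih hp.2 v hv

theorem sorted_head_le {w : List Int} (hp : w.Pairwise (· < ·)) :
    ∀ v ∈ w, w.headD 0 ≤ v := by
  cases w with
  | nil => intro v hv; simp at hv
  | cons a tl =>
    rw [List.pairwise_cons] at hp
    intro v hv
    rcases List.mem_cons.mp hv with rfl | hv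
    · simp
    · exact le_of_lt (hp.1 v hv)

-- the scan loop returns k + the length of the longest satisfying prefix
theorem scanK_eq (s : Int) : ∀ (tl : List Int) (k : Nat),
    scanK tl s k = k + (tl.takeWhile (fun v => decide (2 * v ≤ s))).length := by
  intro tl
  induction tl with
  | nil => intro k; simp [scanK]
  | cons v tl' ih =>
    intro k
    by_cases hv : 2 * v ≤ s
    · simp [scanK, hv, ih (k + 1)]; omega
    · simp [scanK, hv]

-- take/drop at the takeWhile length are takeWhile/dropWhile
theorem take_takeWhile_len (P : Int → Bool) : ∀ (l : List Int),
    l.take ((l.takeWhile P).length) = l.takeWhile P ∧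
    l.drop ((l.takeWhile P).length) = l.dropWhile P := by
  intro l
  induction l with
  | nil => simp
  | cons a tl ih =>
    by_cases ha : P a
    · simp [ha, ih]
    · simp [ha]

-- on a strictly sorted list, the monotone prefix IS the filter
theorem takeWhile_eq_filter (s : Int) : ∀ {w : List Int}, w.Pairwise (· < ·) →
    w.takeWhile (fun v => decide (2 * v ≤ s)) = w.filter (fun v => decide (2 * v ≤ s)) ∧
    w.dropWhile (fun v => decide (2 * v ≤ s)) = w.filter (fun v => !decide (2 * v ≤ s)) := by
  intro w
  induction w with
  | nil => simp
  | cons a tl ih =>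
    intro hp
    rw [List.pairwise_cons] at hp
    by_cases ha : 2 * a ≤ s
    · simp only [List.takeWhile_cons, List.dropWhile_cons, List.filter_cons, ha,
        decide_true, Bool.not_true, if_true]
      constructor
      · rw [(ih hp.2).1]
      · rw [(ih hp.2).2]; simp
    · have htl : ∀ b ∈ tl, ¬ (2 * b ≤ s) := fun b hb h2 => ha (by have := hp.1 b hb; omega)
      simp only [List.takeWhile_cons, List.dropWhile_cons, List.filter_cons, ha,
        decide_false, Bool.not_false]
      constructor
      · rw [List.filter_eq_nil_iff.mpr (by intro b hb; simpa using htl b hb)]; simp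
      · rw [List.filter_eq_self.mpr (by intro b hb; simpa using htl b hb)]; simp

-- min/max of the interval filter are the slice ends
theorem extrema_filter {seg w : List Int} (hw : w ≠ []) (hp : w.Pairwise (· < ·))
    (hsub : ∀ v ∈ w, v ∈ seg) :
    seg.filter (fun r => decide (r ∈ w)) ≠ [] ∧
    segMax (seg.filter (fun r => decide (r ∈ w))) = w.getLastD 0 ∧
    segMin (seg.filter (fun r => decide (r ∈ w))) = w.headD 0 := by
  set t := seg.filter (fun r => decide (r ∈ w)) with ht
  have hmem : ∀ v ∈ w, v ∈ t := by
    intro v hv; rw [ht, List.mem_filter]; exact ⟨hsub v hv, by simpa using hv⟩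
  have hlastw : w.getLastD 0 ∈ w := getLastD_mem' w hw 0
  have hheadw : w.headD 0 ∈ w := by
    cases w with
    | nil => exact absurd rfl hw
    | cons a tl => simp
  have hne : t ≠ [] := by
    intro he; have := hmem _ hlastw; rw [he] at this; exact absurd this (List.not_mem_nil)
  refine ⟨hne, ?_, ?_⟩
  · have h1 := (segMax_spec hne).1
    have h2 := (segMax_spec hne).2 _ (hmem _ hlastw)
    have h3 : segMax t ∈ w := by
      have := h1; rw [ht, List.mem_filter] at this; simpa using this.2
    exact le_antisymm (sorted_le_last hp _ h3) h2
  · have h1 := (segMin_spec hne).1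
    have h2 := (segMin_spec hne).2 _ (hmem _ hheadw)
    have h3 : segMin t ∈ w := by
      have := h1; rw [ht, List.mem_filter] at this; simpa using this.2
    exact le_antisymm h2 (sorted_head_le hp _ h3)

theorem headD_mem' (w : List Int) (h : w ≠ []) : w.headD 0 ∈ w := by
  cases w with
  | nil => exact absurd rfl h
  | cons a tl => simp

-- realisation of a run as the sub-segment of seg whose values lie in it
def runFilter (seg : List Int) : List Int → List Int :=
  fun g => seg.filter (fun r => decide (r ∈ g))

-- base case of the cut recursion: one run, realising the whole sub-segment
theorem cut_base (seg w : List Int) (L : Int) (hw : w ≠ []) (hp : w.Pairwise (· < ·))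
    (hsub : ∀ v ∈ w, v ∈ seg)
    (hcond : w.getLastD 0 - w.headD 0 ≤ L) (f' : Nat) :
    (cutB (f' + 1) w L).map (runFilter seg)
        = Afix (seg.filter (fun r => decide (r ∈ w))) L ∧
      (cutB (f' + 1) w L).flatten = w := by
  obtain ⟨hne', hmax, hmin⟩ := extrema_filter hw hp hsub
  have h1 : cutB (f' + 1) w L = [w] := by
    simp only [cutB]; rw [if_pos hcond]
  rw [h1, Afix_short (by rw [hmax, hmin]; exact hcond)]
  exact ⟨rfl, by simp⟩

-- MAIN: cutB's runs, realised as filters of seg, are exactly A's recursion on the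
-- sub-segment of seg whose values lie in w; and together the runs partition w
theorem cut_main (seg : List Int) (L : Int) (hL : 0 ≤ L) :
    ∀ (n : Nat) (w : List Int) (f : Nat), w ≠ [] → w.Pairwise (· < ·) →
    (∀ v ∈ w, v ∈ seg) →
    rngW w ≤ n → rngW w < f →
    ((cutB f w L).map (runFilter seg)
        = Afix (seg.filter (fun r => decide (r ∈ w))) L) ∧
      (cutB f w L).flatten = w := by
  intro n
  induction n with
  | zero =>
    intro w f hw hp hsub hn hf
    obtain ⟨f', rfl⟩ : ∃ f', f = f' + 1 := ⟨f - 1, by omega⟩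
    have hmm : w.headD 0 ≤ w.getLastD 0 := sorted_le_last hp _ (headD_mem' w hw)
    exact cut_base seg w L hw hp hsub (by simp only [rngW] at hn; omega) f'
  | succ n ih =>
    intro w f hw hp hsub hn hf
    obtain ⟨f', rfl⟩ : ∃ f', f = f' + 1 := ⟨f - 1, by omega⟩
    set mn := w.headD 0 with hmn
    set mx := w.getLastD 0 with hmx
    by_cases hcond : mx - mn ≤ L
    · exact cut_base seg w L hw hp hsub hcond f'
    · obtain ⟨hne', hmaxt, hmint⟩ := extrema_filter hw hp hsub
      have hmm : mn ≤ mx := sorted_le_last hp _ (headD_mem' w hw)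
      have hlt : mn < mx := by omega
      -- the scan index and the two slices
      have hka : ∃ a tl, w = a :: tl := by
        cases w with
        | nil => exact absurd rfl hw
        | cons a tl => exact ⟨a, tl, rfl⟩
      obtain ⟨a, tl, rfl⟩ := hka
      have ha : a = mn := rfl
      have hPa : decide (2 * a ≤ mn + mx) = true := by simp [ha]; omega
      have hk : scanK ((a :: tl).drop 1) (mn + mx) 1
          = ((a :: tl).takeWhile (fun v => decide (2 * v ≤ mn + mx))).length := by
        rw [List.drop_one, List.tail_cons, scanK_eq, List.takeWhile_cons, hPa]
        simp only [if_true, List.length_cons]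
        omega
      have htake := take_takeWhile_len (fun v => decide (2 * v ≤ mn + mx)) (a :: tl)
      have htwf := takeWhile_eq_filter (mn + mx) hp
      set k := scanK ((a :: tl).drop 1) (mn + mx) 1 with hkdef
      have hwl : (a :: tl).take k = (a :: tl).filter (fun v => decide (2 * v ≤ mn + mx)) := by
        rw [hk, htake.1, htwf.1]
      have hwr : (a :: tl).drop k = (a :: tl).filter (fun v => !decide (2 * v ≤ mn + mx)) := by
        rw [hk, htake.2, htwf.2]
      set wl := (a :: tl).filter (fun v => decide (2 * v ≤ mn + mx)) with hwl'
      set wr := (a :: tl).filter (fun v => !decide (2 * v ≤ mn + mx)) with hwr'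
      -- facts about the slices
      have hmem_wl : ∀ v, v ∈ wl ↔ (v ∈ a :: tl ∧ 2 * v ≤ mn + mx) := by
        intro v; rw [hwl', List.mem_filter]; simp
      have hmem_wr : ∀ v, v ∈ wr ↔ (v ∈ a :: tl ∧ mn + mx < 2 * v) := by
        intro v; rw [hwr', List.mem_filter]; simp
      have hwl_ne : wl ≠ [] := by
        have : a ∈ wl := (hmem_wl a).mpr ⟨by simp, by rw [ha]; omega⟩
        intro he; rw [he] at this; exact absurd this (List.not_mem_nil)
      have hmx_mem : mx ∈ (a :: tl) := by rw [hmx]; exact getLastD_mem' _ hw 0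
      have hwr_ne : wr ≠ [] := by
        have : mx ∈ wr := (hmem_wr mx).mpr ⟨hmx_mem, by omega⟩
        intro he; rw [he] at this; exact absurd this (List.not_mem_nil)
      have hp_wl : wl.Pairwise (· < ·) := hp.filter _
      have hp_wr : wr.Pairwise (· < ·) := hp.filter _
      have hsub_wl : ∀ v ∈ wl, v ∈ seg := fun v hv => hsub v ((hmem_wl v).mp hv).1
      have hsub_wr : ∀ v ∈ wr, v ∈ seg := fun v hv => hsub v ((hmem_wr v).mp hv).1
      -- slice ends
      have hwl_head : wl.headD 0 = mn := by
        rw [hwl', List.filter_cons, hPa]; simp [ha]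
      have hml_mem : wl.getLastD 0 ∈ wl := getLastD_mem' wl hwl_ne 0
      set ml := wl.getLastD 0 with hml
      have hml1 : 2 * ml ≤ mn + mx := ((hmem_wl ml).mp hml_mem).2
      have hml2 : mn ≤ ml := sorted_head_le hp _ ((hmem_wl ml).mp hml_mem).1
      have hml3 : ml < mx := by omega
      have hwr_last : wr.getLastD 0 = mx := by
        have hsplit : wl ++ wr = a :: tl := by rw [← hwl, ← hwr, List.take_append_drop]
        rw [← getLastD_append wl wr hwr_ne 0, hsplit, ← hmx]
      have hmr_mem : wr.headD 0 ∈ wr := headD_mem' wr hwr_ne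
      set mr := wr.headD 0 with hmr
      have hmr1 : mn + mx < 2 * mr := ((hmem_wr mr).mp hmr_mem).2
      have hmr2 : mr ≤ mx := sorted_le_last hp _ ((hmem_wr mr).mp hmr_mem).1
      have hmr3 : mn < mr := by omega
      -- fuel bookkeeping
      have hrng_wl : rngW wl < rngW (a :: tl) := by
        simp only [rngW, ← hml, hwl_head, ← hmn, ← hmx]; omega
      have hrng_wr : rngW wr < rngW (a :: tl) := by
        simp only [rngW, ← hmr, hwr_last, ← hmn, ← hmx]; omega
      -- unfold one cut step
      have hstep : cutB (f' + 1) (a :: tl) L = cutB f' wl L ++ cutB f' wr L := by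
        simp only [cutB]
        rw [if_neg (by rw [← hmn, ← hmx]; exact hcond), ← hkdef, hwl, hwr]
      obtain ⟨ihl1, ihl2⟩ := ih wl f' hwl_ne hp_wl hsub_wl (by omega) (by omega)
      obtain ⟨ihr1, ihr2⟩ := ih wr f' hwr_ne hp_wr hsub_wr (by omega) (by omega)
      constructor
      · rw [hstep, List.map_append, ihl1, ihr1]
        -- A's step on the sub-segment
        rw [Afix_long hne' hL (by rw [hmaxt, hmint]; exact hcond), hmaxt, hmint]
        -- identify the filtered sub-segments
        have hfl : (seg.filter (fun r => decide (r ∈ a :: tl))).filter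
            (fun r => 2 * r ≤ mx + mn) = seg.filter (fun r => decide (r ∈ wl)) := by
          rw [List.filter_filter]
          apply List.filter_congr
          intro r hr
          by_cases hrw : r ∈ wl
          · have := (hmem_wl r).mp hrw
            simp [hrw, this.1, show 2 * r ≤ mx + mn by omega]
          · simp only [hrw, decide_false]
            by_cases hrin : r ∈ a :: tl
            · by_cases hle : 2 * r ≤ mx + mn
              · exact absurd ((hmem_wl r).mpr ⟨hrin, by omega⟩) hrw
              · simp [hle]
            · simp [hrin]
        have hfr : (seg.filter (fun r => decide (r ∈ a :: tl))).filter
            (fun r => 2 * r > mx + mn) = seg.filter (fun r => decide (r ∈ wr)) := by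
          rw [List.filter_filter]
          apply List.filter_congr
          intro r hr
          by_cases hrw : r ∈ wr
          · have := (hmem_wr r).mp hrw
            simp [hrw, this.1, show 2 * r > mx + mn by omega]
          · simp only [hrw, decide_false]
            by_cases hrin : r ∈ a :: tl
            · by_cases hle : 2 * r > mx + mn
              · exact absurd ((hmem_wr r).mpr ⟨hrin, by omega⟩) hrw
              · simp [hle]
            · simp [hrin]
        rw [hfl, hfr]
      · rw [hstep, List.flatten_append, ihl2, ihr2, ← hwl, ← hwr, List.take_append_drop]

-- ---------- the index dictionary and the distribution pass ----------

-- the inner loop `for v in g: index_of[v] = i`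
theorem inner_getD (i : Int) : ∀ (g : List Int) (d : PySem.Dict Int Int) (v : Int),
    PySem.Dict.getD (g.foldl (fun d v => PySem.Dict.insert d v i) d) v 0
      = if v ∈ g then i else PySem.Dict.getD d v 0 := by
  intro g
  induction g with
  | nil => intro d v; simp
  | cons a g' ih =>
    intro d v
    rw [List.foldl_cons, ih]
    by_cases hv : v ∈ g'
    · simp [hv]
    · rw [if_neg hv, PySem.Dict.getD_insert]
      by_cases hva : v = a
      · simp [hva]
      · simp [hva, hv]

-- the outer loop over `enumerate(groups)`: on pairwise-disjoint groups the dict maps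
-- every value of a group to that group's index
theorem outer_getD : ∀ (gs : List (Int × List Int)) (d : PySem.Dict Int Int) (v : Int),
    ((gs.map (·.2)).flatten.Nodup) →
    ((∀ p ∈ gs, v ∉ p.2) →
      PySem.Dict.getD (gs.foldl (fun d p => p.2.foldl (fun d v => PySem.Dict.insert d v p.1) d) d) v 0
        = PySem.Dict.getD d v 0) ∧
    (∀ p ∈ gs, v ∈ p.2 →
      PySem.Dict.getD (gs.foldl (fun d p => p.2.foldl (fun d v => PySem.Dict.insert d v p.1) d) d) v 0
        = p.1) := by
  intro gs
  induction gs with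
  | nil => intro d v _; exact ⟨fun _ => rfl, fun p hp => absurd hp (List.not_mem_nil)⟩
  | cons q rest ih =>
    intro d v hnd
    have hnd' : ((rest.map (·.2)).flatten.Nodup) := by
      simp only [List.map_cons, List.flatten_cons, List.nodup_append] at hnd
      exact hnd.2.1
    have hdisj : ∀ x ∈ q.2, x ∉ (rest.map (·.2)).flatten := by
      simp only [List.map_cons, List.flatten_cons, List.nodup_append] at hnd
      intro x hx hx'
      exact hnd.2.2 x hx x hx' rfl
    constructor
    · intro hnone
      rw [List.foldl_cons, (ih _ v hnd').1 (fun p hp hv =>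
          hnone p (List.mem_cons_of_mem q hp) hv), inner_getD,
          if_neg (hnone q List.mem_cons_self)]
    · intro p hp hv
      rcases List.mem_cons.mp hp with rfl | hp'
      · rw [List.foldl_cons, (ih _ v hnd').1 (fun p' hp' hv' =>
            hdisj v hv (List.mem_flatten.mpr ⟨p'.2, List.mem_map_of_mem hp', hv'⟩)),
            inner_getD, if_pos hv]
      · rw [List.foldl_cons]
        exact (ih _ v hnd').2 p hp' hv

-- a nodup flattening means the groups are pairwise disjoint
theorem flatten_nodup_disjoint : ∀ (gs : List (List Int)), gs.flatten.Nodup →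
    gs.Pairwise (fun g g' => ∀ x ∈ g, x ∉ g') := by
  intro gs
  induction gs with
  | nil => intro _; exact List.Pairwise.nil
  | cons g rest ih =>
    intro h
    rw [List.flatten_cons, List.nodup_append] at h
    exact List.Pairwise.cons
      (fun g' hg' x hx hx' =>
        h.2.2 x hx x (List.mem_flatten.mpr ⟨g', hg', hx'⟩) rfl)
      (ih h.2.1)

-- the distribution loop: appending every element to its group's bucket realises,
-- bucket by bucket, the filter of the processed prefix
theorem distribute_inv (gs : List (List Int)) (d : PySem.Dict Int Int)
    (hnd : gs.flatten.Nodup)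
    (hidx : ∀ r ∈ gs.flatten, ∃ j, ∃ _ : j < gs.length, r ∈ gs[j] ∧ (PySem.Dict.getD d r 0).toNat = j) :
    ∀ (seg : List Int) (acc : List (List Int)),
    (∀ r ∈ seg, r ∈ gs.flatten) →
    acc.length = gs.length →
    seg.foldl (fun bs r =>
        let i := (PySem.Dict.getD d r 0).toNat
        bs.set i (bs.getD i [] ++ [r])) acc
      = (acc.zip gs).map (fun p => p.1 ++ seg.filter (fun r => decide (r ∈ p.2))) := by
  have hdisj : ∀ (j t : Nat) (hj : j < gs.length) (ht : t < gs.length), j ≠ t →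
      ∀ x ∈ gs[j], x ∉ gs[t] := by
    have hpw := flatten_nodup_disjoint gs hnd
    rw [List.pairwise_iff_getElem] at hpw
    intro j t hj ht hne x hx hx'
    rcases Nat.lt_or_ge j t with hlt | hge
    · exact hpw j t hj ht hlt x hx hx'
    · exact hpw t j ht hj (by omega) x hx' hx
  intro seg
  induction seg with
  | nil =>
    intro acc _ hlen
    simp only [List.foldl_nil, List.filter_nil, List.append_nil]
    rw [List.map_fst_zip (by omega : acc.length ≤ gs.length)]
  | cons r rest ih =>
    intro acc hmem hlen
    obtain ⟨j, hj, hrj, hd⟩ := hidx r (hmem r List.mem_cons_self)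
    rw [List.foldl_cons]
    have hstep : (let i := (PySem.Dict.getD d r 0).toNat
        acc.set i (acc.getD i [] ++ [r])) = acc.set j (acc.getD j [] ++ [r]) := by
      simp only [hd]
    rw [hstep, ih _ (fun x hx => hmem x (List.mem_cons_of_mem r hx)) (by simp [hlen])]
    apply List.ext_getElem
    · simp [hlen]
    · intro t ht1 ht2
      have htlen : t < gs.length := by
        simp only [List.length_map, List.length_zip, List.length_set, hlen] at ht1
        omega
      have htacc : t < acc.length := by omega
      have hgd : acc.getD j [] = acc[j]'(by omega) := List.getD_eq_getElem acc [] (by omega)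
      simp only [List.getElem_map, List.getElem_zip, hgd, List.getElem_set]
      by_cases hteq : j = t
      · subst hteq
        rw [List.filter_cons_of_pos (by simpa using hrj)]
        simp [List.append_assoc]
      · simp only [if_neg hteq]
        rw [List.filter_cons_of_neg
          (by simpa using hdisj j t hj htlen (by omega) r hrj)]

-- ===== VERDICT (by name: the statement is the Claim_ definition above) =====
theorem return_short_enough_segments_spec : Claim_equal_return_short_enough_segments := by
  intro seg L _ hPre
  obtain ⟨hne, hL⟩ := hPre
  unfold Spec_return_short_enough_segments
  unfold return_short_enough_segments return_short_enough_segments_alt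
  set vals := PySem.List.sorted (PySem.Set.ofList seg) (fun x => x) false with hv
  have hpair : vals.Pairwise (· < ·) := PySem.List.sorted_ofList_pairwise_lt seg
  have hmemv : ∀ v, v ∈ vals ↔ v ∈ seg := by
    intro v; rw [hv, PySem.List.mem_sorted, PySem.Set.mem_ofList]
  have hvne : vals ≠ [] := by
    cases seg with
    | nil => exact absurd rfl hne
    | cons a tl =>
      intro he
      have : a ∈ vals := (hmemv a).mpr (by simp)
      rw [he] at this; exact absurd this (List.not_mem_nil)
  set groups := cutB ((vals.getLastD 0 - vals.headD 0).toNat + 1) vals L with hg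
  obtain ⟨main1, main2⟩ := cut_main seg L hL (rngW vals) vals (rngW vals + 1) hvne hpair
    (fun v hv' => (hmemv v).mp hv') le_rfl (by omega)
  have hgm : groups = cutB (rngW vals + 1) vals L := hg
  rw [← hgm] at main1 main2
  have hfe : seg.filter (fun r => decide (r ∈ vals)) = seg :=
    List.filter_eq_self.mpr (fun r hr => by simp [(hmemv r).mpr hr])
  rw [hfe] at main1
  have hnd : groups.flatten.Nodup := by
    rw [main2]
    exact hpair.imp (fun h => ne_of_lt h)
  -- the dictionary maps every value to the index of its run
  have hidx : ∀ r ∈ groups.flatten, ∃ j, ∃ _ : j < groups.length,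
      r ∈ groups[j] ∧
      (PySem.Dict.getD ((PySem.List.enumerate groups).foldl
        (fun d (p : Int × List Int) => p.2.foldl (fun d v => PySem.Dict.insert d v p.1) d) PySem.Dict.empty) r 0).toNat = j := by
    intro r hr
    obtain ⟨g, hg', hrg⟩ := List.mem_flatten.mp hr
    obtain ⟨j, hj, rfl⟩ := List.mem_iff_getElem.mp hg'
    refine ⟨j, hj, hrg, ?_⟩
    have hp : ((j : Int), groups[j]) ∈ PySem.List.enumerate groups 0 := by
      rw [PySem.List.mem_enumerate_iff]
      exact ⟨j, hj, by simp⟩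
    have hout := (outer_getD (PySem.List.enumerate groups) PySem.Dict.empty r
      (by rw [PySem.List.map_snd_enumerate]; exact hnd)).2
      ((j : Int), groups[j]) hp hrg
    rw [hout]
    simp
  rw [distribute_inv groups _ hnd hidx seg (groups.map (fun _ => ([] : List Int)))
      (fun r hr => by rw [main2]; exact (hmemv r).mpr hr) (by simp)]
  -- collapse the empty starting buckets
  have hzip : ∀ (gs : List (List Int)),
      ((gs.map (fun _ => ([] : List Int))).zip gs).map
        (fun p : List Int × List Int => p.1 ++ seg.filter (fun r => decide (r ∈ p.2)))
      = gs.map (runFilter seg) := by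
    intro gs
    induction gs with
    | nil => rfl
    | cons g rest ih =>
      simp only [List.map_cons, List.zip_cons_cons, List.nil_append, ih, runFilter]
  rw [hzip, main1]
  rfl
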